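-- pv_equiv track=rewrite | github.com/acorrenson/IA-clou | src/main.py | compter_nombre_pions
-- ===== SOURCE A (Python) =====
-- def pion(joueur):
--     if joueur == 0:
--         return 'X'
--     else:
--         return 'O'
--
-- def compter_nombre_pions(grille):
--     nombre_joueur0 = 0
--     nombre_joueur1 = 0
--     for lignes in grille:
--         for pions in lignes:
--             if pions == pion(0):
--                 nombre_joueur0 += 1
--             elif pions == pion(1):
--                 nombre_joueur1 += 1
--     return (nombre_joueur0, nombre_joueur1)
-- ===== SOURCE B (Python) =====
-- def compter_nombre_pions(grille):
--     flat = [p for ligne in grille for p in ligne]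
--     return (flat.count('X'), flat.count('O'))
-- ===== Notes on version B (the rewrite author's own statement) =====
-- stated objective: idiomatic
-- what changed: Replaces the two scalar accumulators and if/elif dispatch with a flatten step followed by two list.count lookups.
import Mathlib
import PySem

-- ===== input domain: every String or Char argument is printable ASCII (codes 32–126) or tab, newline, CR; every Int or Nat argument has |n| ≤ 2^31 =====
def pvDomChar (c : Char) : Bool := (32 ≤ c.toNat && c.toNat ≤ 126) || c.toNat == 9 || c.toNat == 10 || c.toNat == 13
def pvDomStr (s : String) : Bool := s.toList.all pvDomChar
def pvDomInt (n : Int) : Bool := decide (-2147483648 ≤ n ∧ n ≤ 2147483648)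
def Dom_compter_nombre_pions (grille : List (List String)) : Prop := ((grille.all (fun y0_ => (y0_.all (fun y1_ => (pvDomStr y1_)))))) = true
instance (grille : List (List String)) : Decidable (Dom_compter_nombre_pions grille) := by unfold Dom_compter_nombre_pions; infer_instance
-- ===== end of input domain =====

-- B flattens the grid and counts 'X' and 'O' with list.count instead of a two-accumulator branching loop (idiomatic, same cost).
-- ===== PORT A =====
def pion (joueur : Int) : String :=
  if joueur == 0 then "X" else "O"

def compter_nombre_pions (grille : List (List String)) : Int × Int :=
  grille.foldl
    (fun (acc : Int × Int) lignes =>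
      lignes.foldl
        (fun (acc : Int × Int) pions =>
          if pions == pion 0 then (acc.1 + 1, acc.2)
          else if pions == pion 1 then (acc.1, acc.2 + 1)
          else acc)
        acc)
    (0, 0)

-- ===== PORT B =====
def compter_nombre_pions_alt (grille : List (List String)) : Int × Int :=
  let flat := grille.flatMap (fun ligne => ligne)
  ((flat.count "X" : Int), (flat.count "O" : Int))

-- ===== PRECONDITION & SPEC =====
def Spec_compter_nombre_pions (grille : List (List String)) (out : Int × Int) : Prop := out = compter_nombre_pions_alt grille
instance (grille : List (List String)) (out : Int × Int) : Decidable (Spec_compter_nombre_pions grille out) := by unfold Spec_compter_nombre_pions; infer_instance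

-- ===== CLAIM (what is proved, stated in full; the proofs are below) =====
def Claim_equal_compter_nombre_pions : Prop := ∀ (grille : List (List String)), Dom_compter_nombre_pions grille → Spec_compter_nombre_pions grille (compter_nombre_pions grille)

-- ===== LEMMAS AND PROOFS =====
theorem row_foldl (l : List String) (a : Int × Int) :
    l.foldl
      (fun (acc : Int × Int) pions =>
        if pions == pion 0 then (acc.1 + 1, acc.2)
        else if pions == pion 1 then (acc.1, acc.2 + 1)
        else acc)
      a = (a.1 + (l.count "X" : Int), a.2 + (l.count "O" : Int)) := by
  induction l generalizing a with
  | nil => simp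
  | cons x xs ih =>
    rw [List.foldl_cons, ih]
    simp only [pion, List.count_cons, Prod.ext_iff]
    by_cases hx : x = "X" <;> by_cases ho : x = "O" <;>
      simp [hx, ho] <;> push_cast <;> omega

theorem grid_foldl (g : List (List String)) (a : Int × Int) :
    g.foldl
      (fun (acc : Int × Int) lignes =>
        lignes.foldl
          (fun (acc : Int × Int) pions =>
            if pions == pion 0 then (acc.1 + 1, acc.2)
            else if pions == pion 1 then (acc.1, acc.2 + 1)
            else acc)
          acc)
      a
      = (a.1 + ((g.flatMap (fun l => l)).count "X" : Int),
         a.2 + ((g.flatMap (fun l => l)).count "O" : Int)) := by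
  induction g generalizing a with
  | nil => simp
  | cons l g ih =>
    rw [List.foldl_cons, row_foldl, ih]
    simp only [List.flatMap_cons, List.count_append, Prod.ext_iff]
    constructor <;> push_cast <;> ring

-- ===== VERDICT (by name: the statement is the Claim_ definition above) =====
theorem compter_nombre_pions_spec : Claim_equal_compter_nombre_pions := by
  intro g _
  unfold Spec_compter_nombre_pions compter_nombre_pions compter_nombre_pions_alt
  rw [grid_foldl]
  simp
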